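-- pv_equiv track=rewrite | github.com/Aronxhen/9021-Polygons | polygons.py | change_equal
-- ===== SOURCE A (Python) =====
-- def change_equal(figure_list):
--     max_index = len(figure_list) - 1
--     for right in range(max_index):
--         for left in range(max_index, right, -1):
--             if figure_list[right] == figure_list[left]:
--                 new_figure_list = figure_list[:right] + figure_list[left:]
--                 return new_figure_list
--
--     return figure_list
-- ===== SOURCE B (Python) =====
-- def change_equal(figure_list):
--     last = {}
--     for i, v in enumerate(figure_list):
--         last[v] = i
--     for i, v in enumerate(figure_list):
--         j = last[v]
--         if j > i:
--             return figure_list[:i] + figure_list[j:]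
--     return figure_list
-- ===== Notes on version B (the rewrite author's own statement) =====
-- stated objective: alternative
-- what changed: Replaced the nested downward index scan by a dict of last-occurrence indices built in one pass plus a single forward scan.
import Mathlib
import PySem

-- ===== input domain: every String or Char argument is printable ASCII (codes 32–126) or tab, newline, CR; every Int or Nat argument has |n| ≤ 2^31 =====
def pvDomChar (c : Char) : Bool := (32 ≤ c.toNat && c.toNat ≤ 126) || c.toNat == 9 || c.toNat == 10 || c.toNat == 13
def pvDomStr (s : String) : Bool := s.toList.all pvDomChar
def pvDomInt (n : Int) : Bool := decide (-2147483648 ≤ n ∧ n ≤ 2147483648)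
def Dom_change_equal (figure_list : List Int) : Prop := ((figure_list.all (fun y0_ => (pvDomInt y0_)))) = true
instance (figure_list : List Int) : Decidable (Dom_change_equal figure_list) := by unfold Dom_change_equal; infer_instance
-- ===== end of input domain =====

-- B replaces A's quadratic nested index scan by one dict of last occurrences plus one forward scan (O(n)); same return value everywhere.

-- ===== PORT A =====
-- inner 'for left in range(max_index, right, -1)' with early return
def innerA (l : List Int) (right : Int) : List Int → Option (List Int)
  | [] => none
  | left :: rest =>
    if PySem.List.pyGet? l right = PySem.List.pyGet? l left then
      some (PySem.List.slice l none (some right) ++ PySem.List.slice l (some left) none)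
    else innerA l right rest

-- outer 'for right in range(max_index)' with early return
def outerA (l : List Int) : List Int → Option (List Int)
  | [] => none
  | right :: rest =>
    match innerA l right (PySem.List.pyRange ((l.length : Int) - 1) right (-1)) with
    | some r => some r
    | none => outerA l rest

def change_equal (figure_list : List Int) : List Int :=
  (outerA figure_list (PySem.List.pyRange 0 ((figure_list.length : Int) - 1) 1)).getD figure_list

-- ===== PORT B =====
-- scan 'for i, v in enumerate(figure_list)' with early return; d[v] always hits (v was inserted), so getD is exact here
def scanB (l : List Int) (d : PySem.Dict Int Int) : List (Int × Int) → List Int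
  | [] => l
  | (i, v) :: rest =>
    let j := d.getD v 0
    if j > i then PySem.List.slice l none (some i) ++ PySem.List.slice l (some j) none
    else scanB l d rest

def change_equal_alt (figure_list : List Int) : List Int :=
  let last := (PySem.List.enumerate figure_list 0).foldl
      (fun d p => d.insert p.2 p.1) PySem.Dict.empty
  scanB figure_list last (PySem.List.enumerate figure_list 0)

-- ===== PRECONDITION & SPEC =====
def Spec_change_equal (figure_list : List Int) (out : List Int) : Prop := out = change_equal_alt figure_list
instance (figure_list : List Int) (out : List Int) : Decidable (Spec_change_equal figure_list out) := by unfold Spec_change_equal; infer_instance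

-- ===== CLAIM (what is proved, stated in full; the proofs are below) =====
def Claim_equal_change_equal : Prop := ∀ (figure_list : List Int), Dom_change_equal figure_list → Spec_change_equal figure_list (change_equal figure_list)

-- ===== LEMMAS AND PROOFS =====

-- index of the LAST occurrence of v in l (proof-side specification)
def gLast (v : Int) : List Int → Option Nat
  | [] => none
  | x :: xs =>
    match gLast v xs with
    | some j => some (j + 1)
    | none => if x = v then some 0 else none

-- the first matching index scanning right+k, right+k-1, …, right+1 (proof-side)
def findDown (l : List Int) (v : Int) (right : Nat) : Nat → Option Nat
  | 0 => none
  | k + 1 => if l[right + k + 1]? = some v then some (right + k + 1) else findDown l v right k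

lemma gLast_mem {v : Int} : ∀ {l : List Int} {j : Nat}, gLast v l = some j → l[j]? = some v := by
  intro l; induction l with
  | nil => intro j h; simp [gLast] at h
  | cons x xs ih =>
    intro j h
    simp only [gLast] at h
    cases hx : gLast v xs with
    | some j' => rw [hx] at h; cases h; simp only [List.getElem?_cons_succ]; exact ih hx
    | none =>
      rw [hx] at h
      by_cases hxv : x = v
      · simp [hxv] at h; subst h; simp [hxv]
      · simp [hxv] at h

lemma gLast_none {v : Int} : ∀ {l : List Int}, gLast v l = none → ∀ k : Nat, l[k]? ≠ some v := by
  intro l; induction l with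
  | nil => intro _ k; simp
  | cons x xs ih =>
    intro h k
    simp only [gLast] at h
    cases hx : gLast v xs with
    | some j' => rw [hx] at h; simp at h
    | none =>
      rw [hx] at h
      by_cases hxv : x = v
      · simp [hxv] at h
      · cases k with
        | zero => simpa using hxv
        | succ k' => simpa using ih hx k'

lemma gLast_max {v : Int} : ∀ {l : List Int} {j : Nat}, gLast v l = some j →
    ∀ k : Nat, j < k → l[k]? ≠ some v := by
  intro l; induction l with
  | nil => intro j h; simp [gLast] at h
  | cons x xs ih =>
    intro j h k hk
    simp only [gLast] at h
    cases hx : gLast v xs with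
    | some j' =>
      rw [hx] at h; cases h
      cases k with
      | zero => omega
      | succ k' => simpa using ih hx k' (by omega)
    | none =>
      rw [hx] at h
      by_cases hxv : x = v
      · simp [hxv] at h; subst h
        cases k with
        | zero => omega
        | succ k' =>
          intro hc
          have := gLast_none (v := v) (l := xs) hx k'
          simp at hc
          exact this (by simpa using hc)
      · simp [hxv] at h

lemma gLast_ge {v : Int} {l : List Int} {i : Nat} (hi : l[i]? = some v) :
    ∃ j, gLast v l = some j ∧ i ≤ j := by
  cases hg : gLast v l with
  | none => exact absurd hi (gLast_none hg i)
  | some j =>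
    refine ⟨j, rfl, ?_⟩
    by_contra hlt
    exact gLast_max hg i (by omega) hi

lemma gLast_append (v x : Int) : ∀ (l : List Int),
    gLast v (l ++ [x]) = if x = v then some l.length else gLast v l := by
  intro l; induction l with
  | nil => simp [gLast]
  | cons a l ih =>
    simp only [List.cons_append, gLast, ih]
    by_cases hxv : x = v
    · simp [hxv]
    · simp [hxv]

-- the dict built by the B loop holds the last occurrence of each value
lemma dict_last (v : Int) : ∀ (l : List Int) (s : Int) (d₀ : PySem.Dict Int Int),
    ((PySem.List.enumerate l s).foldl (fun d p => d.insert p.2 p.1) d₀).get? v =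
      match gLast v l with
      | some j => some (s + j)
      | none => d₀.get? v := by
  intro l
  induction l using List.reverseRecOn with
  | nil => intro s d₀; simp [gLast]
  | append_singleton l x ih =>
    intro s d₀
    rw [PySem.List.enumerate_append, List.foldl_append, gLast_append]
    simp only [PySem.List.enumerate_cons, PySem.List.enumerate_nil, List.foldl_cons, List.foldl_nil]
    by_cases hxv : x = v
    · subst hxv
      simp [PySem.Dict.get?_insert_self]
    · rw [PySem.Dict.get?_insert, if_neg (fun h => hxv h.symm), ih, if_neg hxv]

lemma findDown_some {l : List Int} {v : Int} {j : Nat} (hg : gLast v l = some j) :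
    ∀ (k right : Nat), right < j → j ≤ right + k → findDown l v right k = some j := by
  intro k
  induction k with
  | zero => intro right h1 h2; omega
  | succ k ih =>
    intro right h1 h2
    by_cases hc : l[right + k + 1]? = some v
    · have : right + k + 1 ≤ j := by
        by_contra h
        exact gLast_max hg (right + k + 1) (by omega) hc
      have hj : j = right + k + 1 := by omega
      simp [findDown, hc, hj]
    · have : j ≠ right + k + 1 := fun h => hc (h ▸ gLast_mem hg)
      simp only [findDown, if_neg hc]
      exact ih right h1 (by omega)

lemma findDown_none {l : List Int} {v : Int} {right : Nat}
    (h : ∀ m, right < m → l[m]? ≠ some v) : ∀ k, findDown l v right k = none := by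
  intro k
  induction k with
  | zero => rfl
  | succ k ih => simp only [findDown, if_neg (h (right + k + 1) (by omega)), ih]

lemma innerA_eq (l : List Int) (v : Int) :
    ∀ (k right : Nat), right + k < l.length → l[right]? = some v →
    innerA l (right : Int) (PySem.List.pyRange ((right : Int) + (k : Int)) (right : Int) (-1)) =
      (findDown l v right k).map (fun j => l.take right ++ l.drop j) := by
  intro k
  induction k with
  | zero =>
    intro right _ _
    rw [PySem.List.pyRange_neg_one_eq_nil (by omega)]
    rfl
  | succ k ih =>
    intro right hlen hv
    have hcons : PySem.List.pyRange ((right : Int) + ((k : Nat) + 1 : Nat)) (right : Int) (-1) =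
        ((right : Int) + (k : Int) + 1) :: PySem.List.pyRange ((right : Int) + (k : Int)) (right : Int) (-1) := by
      push_cast
      rw [PySem.List.pyRange_neg_one_cons (by omega)]
      ring_nf
    rw [hcons]
    simp only [innerA]
    have hgr : PySem.List.pyGet? l (right : Int) = l[right]? := by
      simp [PySem.List.pyGet?_natCast]
    have hc2 : ((right : Int) + (k : Int) + 1) = ((right + k + 1 : Nat) : Int) := by push_cast; ring
    have hgl : PySem.List.pyGet? l ((right : Int) + (k : Int) + 1) = l[right + k + 1]? := by
      rw [hc2]; simpa using PySem.List.pyGet?_natCast l (right + k + 1)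
    rw [hgr, hgl, hv]
    by_cases hc : l[right + k + 1]? = some v
    · rw [if_pos hc.symm]
      simp only [findDown, if_pos hc, Option.map_some]
      rw [PySem.List.slice_to_natCast, hc2, PySem.List.slice_from_natCast]
    · rw [if_neg (fun h => hc h.symm)]
      simp only [findDown, if_neg hc]
      exact ih right (by omega) hv

-- the two scans agree from position i on
lemma main_loop (l : List Int) :
    ∀ (m i : Nat), i + m = l.length →
    (outerA l (PySem.List.pyRange (i : Int) ((l.length : Int) - 1) 1)).getD l =
      scanB l ((PySem.List.enumerate l 0).foldl (fun d p => d.insert p.2 p.1) PySem.Dict.empty)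
        (PySem.List.enumerate (l.drop i) (i : Int)) := by
  intro m
  induction m with
  | zero =>
    intro i hi
    rw [PySem.List.pyRange_one_eq_nil (by omega), List.drop_eq_nil_of_le (by omega)]
    simp [outerA, scanB, PySem.List.enumerate_nil]
  | succ m ih =>
    intro i hi
    have hiLen : i < l.length := by omega
    have hdrop : l.drop i = l[i] :: l.drop (i + 1) := List.drop_eq_getElem_cons hiLen
    rw [hdrop, PySem.List.enumerate_cons]
    obtain ⟨j, hg, hij⟩ := gLast_ge (v := l[i]) (l := l) (i := i) (by simp)
    have hjLen : j < l.length := by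
      obtain ⟨h, -⟩ := List.getElem?_eq_some_iff.mp (gLast_mem hg)
      exact h
    have hdict : ((PySem.List.enumerate l 0).foldl (fun d p => d.insert p.2 p.1)
        PySem.Dict.empty).getD l[i] 0 = (j : Int) := by
      rw [PySem.Dict.getD_eq_get?_getD, dict_last, hg]
      simp
    simp only [scanB, hdict]
    by_cases hcase : i < j
    · -- a later equal value exists: both return the collapsed list
      have hiTop : i < l.length - 1 := by omega
      rw [PySem.List.pyRange_one_cons (by omega)]
      simp only [outerA]
      have hk : ((l.length : Int) - 1) = (i : Int) + ((l.length - 1 - i : Nat) : Int) := by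
        omega
      rw [hk, innerA_eq l l[i] (l.length - 1 - i) i (by omega) (by simp),
        findDown_some hg _ _ hcase (by omega)]
      have hcond : ((j : Int) > (i : Int)) := by exact_mod_cast hcase
      simp only [if_pos hcond, Option.map_some, Option.getD_some]
      rw [PySem.List.slice_to_natCast, PySem.List.slice_from_natCast]
    · -- last occurrence is i itself: both loops move on
      have hnom : ∀ k : Nat, i < k → l[k]? ≠ some l[i] := by
        intro k hk
        exact gLast_max hg k (by omega)
      rw [if_neg (show ¬((j : Int) > (i : Int)) by exact_mod_cast hcase)]
      have hstep : (i : Int) + 1 = ((i + 1 : Nat) : Int) := by omega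
      rw [hstep, ← ih (i + 1) (by omega)]
      by_cases hiTop : i < l.length - 1
      · rw [PySem.List.pyRange_one_cons (by omega)]
        simp only [outerA]
        have hk : ((l.length : Int) - 1) = (i : Int) + ((l.length - 1 - i : Nat) : Int) := by
          omega
        rw [hk, innerA_eq l l[i] (l.length - 1 - i) i (by omega) (by simp),
          findDown_none hnom, Option.map_none, hstep]
      · rw [PySem.List.pyRange_one_eq_nil (by omega),
          PySem.List.pyRange_one_eq_nil (by push_cast; omega)]

-- ===== VERDICT (by name: the statement is the Claim_ definition above) =====
theorem change_equal_spec : Claim_equal_change_equal := by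
  intro l _
  unfold Spec_change_equal change_equal change_equal_alt
  have h := main_loop l l.length 0 (by omega)
  simpa using h
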